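-- pv_equiv track=rewrite | github.com/OliverGoodwin/AI-Player | states.py | fallingTilesTest
-- ===== SOURCE A (Python) =====
-- def fallingTilesTest(state):
--     for y in range(len(state) - 1, -1, -1):  # Start from the last row
--         for x in range(len(state[y])):
--             if state[y][x] in [[-1, 2], [-1, 3], [-1, 0]]:
--                 tile = state[y][x][1]  # Extract the tile type (2 or 3)
--
--                 i = 1  # Start checking one row below
--                 while y + i < len(state) and state[y + i][x] == [-1]:  # Check bounds and empty space
--                     i += 1
--
--                 # Place the tile in the row above the first non-empty space
--                 state[y + i - 1][x].append(tile)
--                 state[y][x].remove(tile)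
--     return state
-- ===== SOURCE B (Python) =====
-- # Gravity by a single bottom-up sweep that maintains, per column, the topmost
-- # non-empty row below the scan line, so a tile's landing row is looked up
-- # instead of found by rescanning the column.  Return-value equivalence; like A,
-- # mutates `state` in place (same append/remove on the cell lists).
-- def fallingTilesTest(state):
--     n = len(state)
--     p = {}  # per column x: topmost non-empty row strictly below the scan row (n if none)
--     for y in range(n - 1, -1, -1):
--         row = state[y]
--         for x in range(len(row)):
--             cell = row[x]
--             if cell == [-1, 2] or cell == [-1, 3] or cell == [-1, 0]:
--                 t = cell[1]
--                 r = p.get(x, n) - 1  # landing row for a tile at (y, x)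
--                 if r != y:
--                     state[r][x].append(t)
--                     cell.remove(t)
--                     p[x] = r
--         for x in range(len(row)):
--             if row[x] != [-1]:
--                 p[x] = y
--     return state
-- ===== Notes on version B (the rewrite author's own statement) =====
-- stated objective: alternative
-- what changed: Replaced the per-tile inner while-scan down the column by a dict of per-column 'topmost non-empty row below the scan line' pointers maintained during a single bottom-up sweep, removing the inner scan (fewer cell reads per tile; not measurably faster on the generated inputs); the Lean claim is about the return value (both Pythons mutate state in place).
-- outside the precondition, e.g. on fallingTilesTest([[[-1, 2]], [[5]], []]): A returns [[[-1, 2]], [[5]], []], B returns [[[-1, 2]], [[5]], []]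
import Mathlib
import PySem

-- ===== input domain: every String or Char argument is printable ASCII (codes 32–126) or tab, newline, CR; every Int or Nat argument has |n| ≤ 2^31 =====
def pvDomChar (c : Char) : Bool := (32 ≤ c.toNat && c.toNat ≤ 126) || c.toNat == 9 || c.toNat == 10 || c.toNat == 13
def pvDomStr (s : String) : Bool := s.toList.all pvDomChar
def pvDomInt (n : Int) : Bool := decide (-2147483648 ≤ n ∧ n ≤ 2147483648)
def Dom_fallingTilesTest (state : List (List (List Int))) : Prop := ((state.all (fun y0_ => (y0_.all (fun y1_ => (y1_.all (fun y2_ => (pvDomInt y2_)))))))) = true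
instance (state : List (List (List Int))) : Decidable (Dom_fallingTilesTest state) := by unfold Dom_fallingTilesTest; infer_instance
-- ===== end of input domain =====

-- B replaces A's per-tile downward while-scan by per-column landing pointers maintained in one
-- bottom-up sweep; equivalence is about the RETURN value (both Pythons mutate in place).

-- Shared grid-access helpers (state[y][x] read/write, row length); ports use them only at
-- indices that are in range, where they are exact.
def pvCell (g : List (List (List Int))) (y x : Nat) : List Int := (g.getD y []).getD x []
def pvSetCell (g : List (List (List Int))) (y x : Nat) (c : List Int) : List (List (List Int)) :=
  g.set y ((g.getD y []).set x c)
def pvRowLen (g : List (List (List Int))) (y : Nat) : Nat := (g.getD y []).length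

def pvScan (g : List (List (List Int))) (x : Nat) (j : Nat) : Nat :=
  if h : j < g.length then
    if pvCell g j x = [-1] then pvScan g x (j + 1) else j
  else j
termination_by g.length - j

def pvAstep (g : List (List (List Int))) (y x : Nat) : List (List (List Int)) :=
  let c := pvCell g y x
  if c = [-1, 2] ∨ c = [-1, 3] ∨ c = [-1, 0] then
    let t := c.getD 1 0
    let stop := pvScan g x (y + 1)
    let g1 := pvSetCell g (stop - 1) x (pvCell g (stop - 1) x ++ [t])
    pvSetCell g1 y x ((PySem.List.remove? (pvCell g1 y x) t).getD [])
  else g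

def pvArow (g : List (List (List Int))) (y : Nat) : List (List (List Int)) :=
  (List.range (pvRowLen g y)).foldl (fun g x => pvAstep g y x) g

def pvAouter (g : List (List (List Int))) : Nat → List (List (List Int))
  | 0 => g
  | k + 1 => pvAouter (pvArow g k) k

def fallingTilesTest (state : List (List (List Int))) : List (List (List Int)) :=
  pvAouter state state.length

def pvBstep (n : Nat) (gp : List (List (List Int)) × PySem.Dict Int Int) (y x : Nat) :
    List (List (List Int)) × PySem.Dict Int Int :=
  let c := pvCell gp.1 y x
  if c = [-1, 2] ∨ c = [-1, 3] ∨ c = [-1, 0] then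
    let t := c.getD 1 0
    let r : Int := gp.2.getD (Int.ofNat x) (Int.ofNat n) - 1
    if r ≠ Int.ofNat y then
      let g1 := pvSetCell gp.1 r.toNat x (pvCell gp.1 r.toNat x ++ [t])
      let g2 := pvSetCell g1 y x ((PySem.List.remove? (pvCell g1 y x) t).getD [])
      (g2, gp.2.insert (Int.ofNat x) r)
    else gp
  else gp

def pvBrow (n : Nat) (gp : List (List (List Int)) × PySem.Dict Int Int) (y : Nat) :
    List (List (List Int)) × PySem.Dict Int Int :=
  let len := pvRowLen gp.1 y
  let gp1 := (List.range len).foldl (fun gp x => pvBstep n gp y x) gp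
  let p2 := (List.range len).foldl
    (fun p x => if pvCell gp1.1 y x ≠ [-1] then p.insert (Int.ofNat x) (Int.ofNat y) else p) gp1.2
  (gp1.1, p2)

def pvBouter (n : Nat) (gp : List (List (List Int)) × PySem.Dict Int Int) :
    Nat → List (List (List Int)) × PySem.Dict Int Int
  | 0 => gp
  | k + 1 => pvBouter n (pvBrow n gp k) k

def fallingTilesTest_alt (state : List (List (List Int))) : List (List (List Int)) :=
  let n := state.length
  (pvBouter n (state, PySem.Dict.empty) n).1

-- ===== PRECONDITION & SPEC =====
-- Pre_ excludes grids where some falling tile sits over a ragged (too short) lower row: there A's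
-- downward scan can evaluate state[j][x] with x out of range and raise IndexError; it thereby also
-- excludes a few ragged grids on which the scan happens to stop before the short row and A still
-- returns (see the cite in the claim).
def Pre_fallingTilesTest (state : List (List (List Int))) : Prop :=
  ∀ y, y < state.length → ∀ x, x < pvRowLen state y →
    (pvCell state y x = [-1, 2] ∨ pvCell state y x = [-1, 3] ∨ pvCell state y x = [-1, 0]) →
    ∀ j, j < state.length → y < j → x < pvRowLen state j
instance (state : List (List (List Int))) : Decidable (Pre_fallingTilesTest state) := by
  unfold Pre_fallingTilesTest
  have I : ∀ y x, Decidable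
      ((pvCell state y x = [-1, 2] ∨ pvCell state y x = [-1, 3] ∨ pvCell state y x = [-1, 0]) →
        ∀ j, j < state.length → y < j → x < pvRowLen state j) := fun y x => by infer_instance
  infer_instance

def pvWitness_fallingTilesTest : List (List (List Int)) := [[[-1, 2]], [[-1]], [[5]]]

def Spec_fallingTilesTest (state : List (List (List Int))) (out : List (List (List Int))) : Prop :=
  out = fallingTilesTest_alt state
instance (state : List (List (List Int))) (out : List (List (List Int))) :
    Decidable (Spec_fallingTilesTest state out) := by unfold Spec_fallingTilesTest; infer_instance

-- ===== CLAIM (what is proved, stated in full; the proofs are below) =====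
def Claim_equal_fallingTilesTest : Prop := ∀ (state : List (List (List Int))),
  Dom_fallingTilesTest state → Pre_fallingTilesTest state →
  Spec_fallingTilesTest state (fallingTilesTest state)

-- ===== LEMMAS AND PROOFS =====

def pvTile (c : List Int) : Prop := c = [-1, 2] ∨ c = [-1, 3] ∨ c = [-1, 0]

def pvTOK (g : List (List (List Int))) : Prop :=
  ∀ y x, y < g.length → x < pvRowLen g y → pvTile (pvCell g y x) →
    ∀ j, j < g.length → y < j → x < pvRowLen g j

def pvColOK (g : List (List (List Int))) (b x : Nat) : Prop :=
  ∀ j, b ≤ j → j < g.length → x < pvRowLen g j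

def pvInv (g : List (List (List Int))) (p : PySem.Dict Int Int) (n b : Nat) : Prop :=
  ∀ x : Nat, pvColOK g b x →
    p.getD (Int.ofNat x) (Int.ofNat n) = Int.ofNat (pvScan g x b)

theorem pvGetD_set {α : Type} (l : List α) (i j : Nat) (a d : α) :
    (l.set i a).getD j d = if i = j ∧ i < l.length then a else l.getD j d := by
  rw [List.getD_eq_getElem?_getD, List.getD_eq_getElem?_getD, List.getElem?_set]
  split_ifs with h1 h2 h3 h4 <;> simp_all
  omega

theorem pvSetCell_length (g : List (List (List Int))) (y x : Nat) (c : List Int) :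
    (pvSetCell g y x c).length = g.length := by
  simp [pvSetCell]

theorem pvRowLen_setCell (g : List (List (List Int))) (y x : Nat) (c : List Int) (j : Nat) :
    pvRowLen (pvSetCell g y x c) j = pvRowLen g j := by
  simp only [pvRowLen, pvSetCell, pvGetD_set]
  split_ifs with h
  · obtain ⟨rfl, _⟩ := h; simp
  · rfl

theorem pvCell_setCell_self (g : List (List (List Int))) (y x : Nat) (c : List Int)
    (hy : y < g.length) (hx : x < pvRowLen g y) :
    pvCell (pvSetCell g y x c) y x = c := by
  simp only [pvRowLen] at hx
  simp only [pvCell, pvSetCell, pvGetD_set]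
  split_ifs with h1 <;> simp_all

theorem pvCell_setCell_ne (g : List (List (List Int))) (y x : Nat) (c : List Int)
    (y' x' : Nat) (h : y' ≠ y ∨ x' ≠ x) :
    pvCell (pvSetCell g y x c) y' x' = pvCell g y' x' := by
  rcases h with h | h
  · simp only [pvCell, pvSetCell, pvGetD_set]
    rw [if_neg]; rintro ⟨rfl, -⟩; exact h rfl
  · simp only [pvCell, pvSetCell, pvGetD_set]
    split_ifs with h1
    · obtain ⟨rfl, -⟩ := h1; rw [pvGetD_set, if_neg]; rintro ⟨rfl, -⟩; exact h rfl
    · rfl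

theorem pvSetCell_cell_self (g : List (List (List Int))) (y x : Nat)
    (hy : y < g.length) (hx : x < pvRowLen g y) :
    pvSetCell g y x (pvCell g y x) = g := by
  simp only [pvSetCell, pvCell]
  have hrow : g.getD y [] = g[y] := by
    rw [List.getD_eq_getElem?_getD, List.getElem?_eq_getElem hy]; rfl
  simp only [pvRowLen] at hx
  have hx' : x < g[y].length := by rw [← hrow]; exact hx
  have hc : (g.getD y []).getD x [] = g[y][x] := by
    rw [hrow, List.getD_eq_getElem?_getD, List.getElem?_eq_getElem hx']; rfl
  rw [hc, hrow, List.set_getElem_self, List.set_getElem_self]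

theorem pvSetCell_setCell (g : List (List (List Int))) (y x : Nat) (c c' : List Int)
    (hy : y < g.length) :
    pvSetCell (pvSetCell g y x c) y x c' = pvSetCell g y x c' := by
  simp only [pvSetCell, pvGetD_set]
  split_ifs with h1
  · rw [List.set_set, List.set_set]
  · exact absurd (And.intro trivial (by simpa using hy)) h1

theorem pvScan_eq (g : List (List (List Int))) (x j : Nat) :
    pvScan g x j = if j < g.length then
      (if pvCell g j x = [-1] then pvScan g x (j + 1) else j) else j := by
  rw [pvScan]; split <;> rfl

theorem pvScan_ge (g : List (List (List Int))) (x j : Nat) : j ≤ pvScan g x j := by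
  induction j using pvScan.induct g x with
  | case1 j h hc ih => rw [pvScan_eq]; simp [h, hc]; omega
  | case2 j h hc => rw [pvScan_eq]; simp [h, hc]
  | case3 j h => rw [pvScan_eq]; simp [h]

theorem pvScan_le (g : List (List (List Int))) (x j : Nat) (h0 : j ≤ g.length) :
    pvScan g x j ≤ g.length := by
  induction j using pvScan.induct g x with
  | case1 j h hc ih => rw [pvScan_eq]; simp [h, hc]; exact ih h
  | case2 j h hc => rw [pvScan_eq]; simp [h, hc]; omega
  | case3 j h => rw [pvScan_eq]; simp [h]; omega

theorem pvScan_empties (g : List (List (List Int))) (x j : Nat) :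
    ∀ i, j ≤ i → i < pvScan g x j → pvCell g i x = [-1] := by
  induction j using pvScan.induct g x with
  | case1 j h hc ih =>
      intro i hji hi
      rw [pvScan_eq] at hi; simp [h, hc] at hi
      rcases Nat.eq_or_lt_of_le hji with rfl | hlt
      · exact hc
      · exact ih i hlt hi
  | case2 j h hc => intro i hji hi; rw [pvScan_eq] at hi; simp [h, hc] at hi; omega
  | case3 j h => intro i hji hi; rw [pvScan_eq] at hi; simp [h] at hi; omega

theorem pvScan_of_ge (g : List (List (List Int))) (x j : Nat) (h : g.length ≤ j) :
    pvScan g x j = j := by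
  rw [pvScan_eq]; simp; omega

theorem pvScan_congr (g g' : List (List (List Int))) (x b : Nat)
    (hl : g'.length = g.length) (hc : ∀ j, b ≤ j → pvCell g' j x = pvCell g j x) :
    pvScan g' x b = pvScan g x b := by
  induction b using pvScan.induct g x with
  | case1 j h hcell ih =>
      conv_lhs => rw [pvScan_eq]
      conv_rhs => rw [pvScan_eq]
      simp only [hl, h, if_true, hc j (le_refl j), hcell, if_pos]
      exact ih (fun i hi => hc i (by omega))
  | case2 j h hcell =>
      conv_lhs => rw [pvScan_eq]
      conv_rhs => rw [pvScan_eq]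
      simp only [hl, h, if_true, hc j (le_refl j), hcell, if_neg, if_false]
  | case3 j h =>
      conv_lhs => rw [pvScan_eq]
      conv_rhs => rw [pvScan_eq]
      simp [hl, h]

theorem pvScan_eq_of (g : List (List (List Int))) (x b e : Nat) (hbe : b ≤ e)
    (he : e ≤ g.length) (hemp : ∀ j, b ≤ j → j < e → pvCell g j x = [-1])
    (hstop : e = g.length ∨ pvCell g e x ≠ [-1]) :
    pvScan g x b = e := by
  induction b using pvScan.induct g x with
  | case1 j h hcell ih =>
      rw [pvScan_eq]; simp only [h, if_true, hcell, if_pos]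
      rcases Nat.eq_or_lt_of_le hbe with rfl | hlt
      · rcases hstop with rfl | hne
        · omega
        · exact absurd hcell hne
      · exact ih hlt (fun i hi1 hi2 => hemp i (by omega) hi2)
  | case2 j h hcell =>
      rw [pvScan_eq]; simp only [h, if_true, hcell, if_neg, if_false]
      rcases Nat.eq_or_lt_of_le hbe with rfl | hlt
      · rfl
      · exact absurd (hemp j (le_refl j) hlt) hcell
  | case3 j h => rw [pvScan_eq]; simp only [h, if_false]; omega


theorem pvStep_eq (n : Nat) (g : List (List (List Int))) (p : PySem.Dict Int Int) (y x : Nat)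
    (hn : n = g.length) (hy : y < g.length) (hx : x < pvRowLen g y)
    (hT : pvTOK g) (hI : pvInv g p n (y + 1)) :
    ∃ p', pvBstep n (g, p) y x = (pvAstep g y x, p') ∧
      (pvAstep g y x).length = g.length ∧
      (∀ j, pvRowLen (pvAstep g y x) j = pvRowLen g j) ∧
      pvTOK (pvAstep g y x) ∧ pvInv (pvAstep g y x) p' n (y + 1) := by
  by_cases htile : pvCell g y x = [-1, 2] ∨ pvCell g y x = [-1, 3] ∨ pvCell g y x = [-1, 0]
  case neg =>
    have hA : pvAstep g y x = g := by simp only [pvAstep, htile, if_false]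
    have hB : pvBstep n (g, p) y x = (g, p) := by simp only [pvBstep, htile, if_false]
    rw [hA, hB]
    exact ⟨p, rfl, rfl, fun j => rfl, hT, hI⟩
  case pos =>
    have hcol : pvColOK g (y + 1) x := fun j h1 h2 => hT y x hy hx htile j h2 (by omega)
    have hp : p.getD (Int.ofNat x) (Int.ofNat n) = Int.ofNat (pvScan g x (y + 1)) := hI x hcol
    obtain ⟨t, hct, htval⟩ : ∃ t : Int, pvCell g y x = [-1, t] ∧ (t = 2 ∨ t = 3 ∨ t = 0) := by
      rcases htile with h | h | h
      exacts [⟨2, h, Or.inl rfl⟩, ⟨3, h, Or.inr (Or.inl rfl)⟩, ⟨0, h, Or.inr (Or.inr rfl)⟩]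
    have ht0 : (pvCell g y x).getD 1 0 = t := by rw [hct]; rfl
    have htne : (-1 : Int) ≠ t := by rcases htval with rfl | rfl | rfl <;> decide
    set stop := pvScan g x (y + 1) with hstopdef
    have hstop_ge : y + 1 ≤ stop := pvScan_ge g x (y + 1)
    have hstop_le : stop ≤ g.length := pvScan_le g x (y + 1) (by omega)
    have hr : p.getD (Int.ofNat x) (Int.ofNat n) - 1 = Int.ofNat (stop - 1) := by
      rw [hp]; show (stop : Int) - 1 = ((stop - 1 : Nat) : Int); omega
    have hA_eq : pvAstep g y x =
        pvSetCell (pvSetCell g (stop - 1) x (pvCell g (stop - 1) x ++ [t])) y x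
          ((PySem.List.remove?
            (pvCell (pvSetCell g (stop - 1) x (pvCell g (stop - 1) x ++ [t])) y x) t).getD []) := by
      simp only [pvAstep, htile, if_true, ht0, ← hstopdef]
    by_cases hstay : stop = y + 1
    case pos =>
      -- no empty cell below the tile: A appends then removes the tile again, a net no-op
      have hys : stop - 1 = y := by omega
      have hcell1_y :
          pvCell (pvSetCell g (stop - 1) x (pvCell g (stop - 1) x ++ [t])) y x =
            pvCell g y x ++ [t] := by
        rw [hys]; exact pvCell_setCell_self g y x _ hy hx
      have hrm : PySem.List.remove? (pvCell g y x ++ [t]) t = some (pvCell g y x) := by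
        rw [hct]
        rcases htval with rfl | rfl | rfl <;> decide
      have hAid : pvAstep g y x = g := by
        rw [hA_eq, hcell1_y, hrm]
        show pvSetCell (pvSetCell g (stop - 1) x _) y x (pvCell g y x) = g
        rw [hys, pvSetCell_setCell g y x _ _ hy, pvSetCell_cell_self g y x hy hx]
      have hbranch : ¬ (p.getD (Int.ofNat x) (Int.ofNat n) - 1 ≠ Int.ofNat y) := by
        rw [hr, hstay]; simp
      have hBid : pvBstep n (g, p) y x = (g, p) := by
        simp only [pvBstep, htile, if_true, hbranch, if_false]
      rw [hAid, hBid]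
      exact ⟨p, rfl, rfl, fun j => rfl, hT, hI⟩
    case neg =>
      -- the tile falls to the empty row stop - 1 > y
      have hr_lt : stop - 1 < g.length := by omega
      have hr_gt : y < stop - 1 := by omega
      have hxr : x < pvRowLen g (stop - 1) :=
        hT y x hy hx htile (stop - 1) (by omega) (by omega)
      have hcell_r : pvCell g (stop - 1) x = [-1] :=
        pvScan_empties g x (y + 1) (stop - 1) (by omega) (by omega)
      have hbranch : p.getD (Int.ofNat x) (Int.ofNat n) - 1 ≠ Int.ofNat y := by
        rw [hr]; intro h; have := Int.ofNat_inj.mp h; omega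
      have hB_eq : pvBstep n (g, p) y x =
          (pvAstep g y x, p.insert (Int.ofNat x) (Int.ofNat (stop - 1))) := by
        simp only [pvBstep, htile, if_true, ht0, hr]
        have htn : (Int.ofNat (stop - 1)).toNat = stop - 1 := by
          show Int.toNat ((stop - 1 : Nat) : Int) = stop - 1; simp
        have hne2 : ¬ Int.ofNat (stop - 1) = Int.ofNat y := by
          intro h; have h' : ((stop - 1 : Nat) : Int) = (y : Int) := h; omega
        rw [if_pos hne2, htn, hA_eq]
      set g1 := pvSetCell g (stop - 1) x (pvCell g (stop - 1) x ++ [t]) with hg1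
      have hcell1_y : pvCell g1 y x = pvCell g y x := by
        rw [hg1]; exact pvCell_setCell_ne g (stop - 1) x _ y x (Or.inl (by omega))
      have hrm : PySem.List.remove? (pvCell g y x) t = some [-1] := by
        rw [hct]
        rcases htval with rfl | rfl | rfl <;> decide
      have hA : pvAstep g y x = pvSetCell g1 y x [-1] := by
        rw [hA_eq, hcell1_y, hrm]
        rfl
      set gA := pvSetCell g1 y x [-1] with hgA
      have hlen1 : g1.length = g.length := pvSetCell_length g (stop - 1) x _
      have hlenA : gA.length = g.length := by
        rw [hgA, pvSetCell_length, hlen1]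
      have hrlA : ∀ j, pvRowLen gA j = pvRowLen g j := fun j => by
        rw [hgA, pvRowLen_setCell, hg1, pvRowLen_setCell]
      have hcA_y : pvCell gA y x = [-1] := by
        rw [hgA, pvCell_setCell_self g1 y x [-1] (by omega)
          (by rw [hg1, pvRowLen_setCell]; exact hx)]
      have hcA_r : pvCell gA (stop - 1) x = [-1] ++ [t] := by
        rw [hgA, pvCell_setCell_ne g1 y x [-1] (stop - 1) x (Or.inl (by omega)), hg1,
          pvCell_setCell_self g (stop - 1) x _ hr_lt hxr, hcell_r]
      have hcA_other : ∀ y' x', (y' ≠ y ∨ x' ≠ x) → (y' ≠ stop - 1 ∨ x' ≠ x) →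
          pvCell gA y' x' = pvCell g y' x' := fun y' x' h1 h2 => by
        rw [hgA, pvCell_setCell_ne g1 y x [-1] y' x' h1, hg1,
          pvCell_setCell_ne g (stop - 1) x _ y' x' h2]
      have hcA_col : ∀ j, j ≠ y → j ≠ stop - 1 → pvCell gA j x = pvCell g j x :=
        fun j h1 h2 => hcA_other j x (Or.inl h1) (Or.inl h2)
      have hTA : pvTOK gA := by
        intro y' x' h1 h2 h3
        rw [hlenA] at h1
        rw [hrlA] at h2
        by_cases hYX : y' = y ∧ x' = x
        · obtain ⟨rfl, rfl⟩ := hYX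
          rw [hcA_y] at h3
          rcases h3 with h | h | h <;> simp at h
        · by_cases hRX : y' = stop - 1 ∧ x' = x
          · obtain ⟨hE1, hE2⟩ := hRX
            intro j hj1 hj2
            rw [hlenA] at hj1
            rw [hrlA, hE2]
            exact hT y x hy hx htile j hj1 (by omega)
          · have h1' : y' ≠ y ∨ x' ≠ x := by
              rcases eq_or_ne y' y with h | h
              · exact Or.inr fun hxx => hYX ⟨h, hxx⟩
              · exact Or.inl h
            have h2' : y' ≠ stop - 1 ∨ x' ≠ x := by
              rcases eq_or_ne y' (stop - 1) with h | h
              · exact Or.inr fun hxx => hRX ⟨h, hxx⟩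
              · exact Or.inl h
            rw [hcA_other y' x' h1' h2'] at h3
            intro j hj1 hj2
            rw [hlenA] at hj1
            rw [hrlA]
            exact hT y' x' h1 h2 h3 j hj1 hj2
      have hIA : pvInv gA (p.insert (Int.ofNat x) (Int.ofNat (stop - 1))) n (y + 1) := by
        intro z hcolz
        by_cases hzx : z = x
        · subst hzx
          rw [PySem.Dict.getD_insert, if_pos rfl]
          congr 1
          refine (pvScan_eq_of gA z (y + 1) (stop - 1) (by omega) (by omega) ?_ ?_).symm
          · intro j hj1 hj2
            rw [hcA_col j (by omega) (by omega)]
            exact pvScan_empties g z (y + 1) j (by omega) (by omega)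
          · right
            rw [hcA_r]
            simp
        · have hne : Int.ofNat z ≠ Int.ofNat x := fun h => hzx (Int.ofNat_inj.mp h)
          rw [PySem.Dict.getD_insert, if_neg hne]
          have hcolz' : pvColOK g (y + 1) z := fun j hj1 hj2 => by
            rw [← hrlA j]; exact hcolz j hj1 (by omega)
          rw [hI z hcolz']
          congr 1
          refine (pvScan_congr g gA z (y + 1) hlenA (fun j hj => ?_)).symm
          exact hcA_other j z (Or.inr hzx) (Or.inr hzx)
      rw [hB_eq, hA]
      exact ⟨_, rfl, hlenA, hrlA, hTA, hIA⟩

theorem pvPass1 (n : Nat) (g : List (List (List Int))) (p : PySem.Dict Int Int) (y : Nat)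
    (hn : n = g.length) (hy : y < g.length) (hT : pvTOK g) (hI : pvInv g p n (y + 1))
    (m : Nat) (hm : m ≤ pvRowLen g y) :
    ∃ p', (List.range m).foldl (fun gp x => pvBstep n gp y x) (g, p) =
        ((List.range m).foldl (fun g x => pvAstep g y x) g, p') ∧
      ((List.range m).foldl (fun g x => pvAstep g y x) g).length = g.length ∧
      (∀ j, pvRowLen ((List.range m).foldl (fun g x => pvAstep g y x) g) j = pvRowLen g j) ∧
      pvTOK ((List.range m).foldl (fun g x => pvAstep g y x) g) ∧
      pvInv ((List.range m).foldl (fun g x => pvAstep g y x) g) p' n (y + 1) := by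
  induction m with
  | zero => exact ⟨p, rfl, rfl, fun j => rfl, hT, hI⟩
  | succ m ih =>
      obtain ⟨p', heq, hlen, hrl, hT', hI'⟩ := ih (by omega)
      rw [List.range_succ, List.foldl_append, List.foldl_append]
      simp only [List.foldl_cons, List.foldl_nil]
      rw [heq]
      obtain ⟨p'', heq2, hlen2, hrl2, hT2, hI2⟩ :=
        pvStep_eq n ((List.range m).foldl (fun g x => pvAstep g y x) g) p' y m
          (by omega) (by omega) (by rw [hrl]; omega) hT' hI'
      refine ⟨p'', heq2, by omega, fun j => by rw [hrl2, hrl], hT2, hI2⟩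

theorem pvPass2_getD (gf : List (List (List Int))) (y : Nat) (p : PySem.Dict Int Int)
    (d : Int) (m : Nat) (z : Nat) :
    ((List.range m).foldl
        (fun p x => if pvCell gf y x ≠ [-1] then p.insert (Int.ofNat x) (Int.ofNat y) else p)
        p).getD (Int.ofNat z) d =
      if z < m ∧ pvCell gf y z ≠ [-1] then Int.ofNat y else p.getD (Int.ofNat z) d := by
  induction m with
  | zero => simp
  | succ m ih =>
      rw [List.range_succ, List.foldl_append]
      simp only [List.foldl_cons, List.foldl_nil]
      by_cases hc : pvCell gf y m = [-1]
      · simp only [hc, ne_eq, not_true_eq_false, if_false, ih]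
        by_cases hz : z = m
        · subst hz; simp [hc]
        · have : (z < m + 1 ∧ pvCell gf y z ≠ [-1]) ↔ (z < m ∧ pvCell gf y z ≠ [-1]) := by
            constructor
            · rintro ⟨h1, h2⟩; exact ⟨by omega, h2⟩
            · rintro ⟨h1, h2⟩; exact ⟨by omega, h2⟩
          rw [if_congr this rfl rfl]
      · simp only [hc, ne_eq, not_false_eq_true, if_true, PySem.Dict.getD_insert, ih]
        by_cases hz : z = m
        · subst hz; simp [hc]
        · have hne : Int.ofNat z ≠ Int.ofNat m := by
            intro h; exact hz (Int.ofNat_inj.mp h)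
          rw [if_neg hne]
          have : (z < m + 1 ∧ pvCell gf y z ≠ [-1]) ↔ (z < m ∧ pvCell gf y z ≠ [-1]) := by
            constructor
            · rintro ⟨h1, h2⟩; exact ⟨by omega, h2⟩
            · rintro ⟨h1, h2⟩; exact ⟨by omega, h2⟩
          rw [if_congr this rfl rfl]

theorem pvRow_eq (n : Nat) (g : List (List (List Int))) (p : PySem.Dict Int Int) (y : Nat)
    (hn : n = g.length) (hy : y < g.length) (hT : pvTOK g) (hI : pvInv g p n (y + 1)) :
    ∃ p', pvBrow n (g, p) y = (pvArow g y, p') ∧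
      (pvArow g y).length = g.length ∧
      (∀ j, pvRowLen (pvArow g y) j = pvRowLen g j) ∧
      pvTOK (pvArow g y) ∧ pvInv (pvArow g y) p' n y := by
  obtain ⟨p1, heq, hlen, hrl, hT', hI'⟩ :=
    pvPass1 n g p y hn hy hT hI (pvRowLen g y) (le_refl _)
  unfold pvBrow pvArow
  simp only [heq]
  refine ⟨_, rfl, hlen, hrl, hT', ?_⟩
  set gA := (List.range (pvRowLen g y)).foldl (fun g x => pvAstep g y x) g with hgA
  intro z hcol
  have hzlen : z < pvRowLen g y := by
    have := hcol y (le_refl y) (by omega)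
    rw [hrl y] at this; exact this
  rw [pvPass2_getD gA y p1 (Int.ofNat n) (pvRowLen g y) z]
  have hylen : y < gA.length := by omega
  by_cases hc : pvCell gA y z = [-1]
  · simp only [hc, ne_eq, not_true_eq_false, and_false, if_false]
    have hcol' : pvColOK gA (y + 1) z := fun j h1 h2 => hcol j (by omega) h2
    rw [hI' z hcol']
    congr 1
    conv_rhs => rw [pvScan_eq]
    simp [hylen, hc]
  · rw [if_pos ⟨hzlen, hc⟩]
    congr 1
    conv_rhs => rw [pvScan_eq]
    simp [hylen, hc]

theorem pvOuter_eq (n : Nat) (k : Nat) :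
    ∀ (g : List (List (List Int))) (p : PySem.Dict Int Int),
      k ≤ g.length → n = g.length → pvTOK g → pvInv g p n k →
      (pvBouter n (g, p) k).1 = pvAouter g k := by
  induction k with
  | zero => intro g p _ _ _ _; rfl
  | succ k ih =>
      intro g p hk hn hT hI
      obtain ⟨p', heq, hlen, hrl, hT', hI'⟩ := pvRow_eq n g p k hn (by omega) hT hI
      show (pvBouter n (pvBrow n (g, p) k) k).1 = pvAouter (pvArow g k) k
      rw [heq]
      exact ih (pvArow g k) p' (by omega) (by omega) hT' hI'

theorem pvAB_eq (state : List (List (List Int)))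
    (hT : pvTOK state) : fallingTilesTest state = fallingTilesTest_alt state := by
  unfold fallingTilesTest fallingTilesTest_alt
  refine (pvOuter_eq state.length state.length state PySem.Dict.empty (le_refl _) rfl hT ?_).symm
  intro x _
  rw [PySem.Dict.getD_empty, pvScan_of_ge state x state.length (le_refl _)]

-- ===== VERDICT (by name: the statement is the Claim_ definition above) =====
theorem fallingTilesTest_spec : Claim_equal_fallingTilesTest := by
  intro state _ hPre
  unfold Spec_fallingTilesTest
  exact pvAB_eq state (fun y x hy hx ht => hPre y hy x hx ht)
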